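-- pv_equiv track=rewrite | github.com/mlevitan96-crypto/stock-bot | scripts/verify_engine_health.py | _pick_symbol
-- ===== SOURCE A (Python) =====
-- from typing import Any, Dict, List, Optional
--
-- def _pick_symbol(uw_cache: Dict[str, Any], preferred: List[str]) -> str:
--     keys = {str(k).upper(): k for k in uw_cache.keys() if k}
--     for p in preferred:
--         u = p.upper()
--         if u in keys:
--             return str(keys[u])
--     if uw_cache:
--         return str(next(iter(uw_cache.keys())))
--     return preferred[0]
-- ===== SOURCE B (Python) =====
-- def _pick_symbol(uw_cache, preferred):
--     # Rank each uppercased preferred symbol by its first position, then take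
--     # the cache key with the best (lowest) rank in a single pass over the keys.
--     rank = {}
--     for i, p in enumerate(preferred):
--         rank.setdefault(p.upper(), i)
--     best_i = None
--     best_k = None
--     for k in uw_cache.keys():
--         if not k:
--             continue
--         i = rank.get(str(k).upper())
--         if i is not None and (best_i is None or i < best_i):
--             best_i, best_k = i, k
--     if best_k is not None:
--         return str(best_k)
--     if uw_cache:
--         return str(next(iter(uw_cache.keys())))
--     return preferred[0]
-- ===== Notes on version B (the rewrite author's own statement) =====
-- stated objective: alternative
-- what changed: B inverts the traversal: it builds a rank index of the preferred symbols (first position per uppercased symbol) and then makes a single argmin pass over the cache keys, instead of A's loop over preferred symbols with a precomputed uppercased-key dict; Pre_ excludes the input where both arguments are empty (A raises IndexError) and caches with two distinct truthy keys that uppercase identically, where A's dict-overwrite (last-wins) tie order is accidental and B keeps the first best key.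
-- outside the precondition, e.g. on _pick_symbol({}, []): A raises IndexError, B raises IndexError; on _pick_symbol({'aa': 'x', 'AA': 'y'}, ['aa']): A returns 'AA', B returns 'aa'
import Mathlib
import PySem

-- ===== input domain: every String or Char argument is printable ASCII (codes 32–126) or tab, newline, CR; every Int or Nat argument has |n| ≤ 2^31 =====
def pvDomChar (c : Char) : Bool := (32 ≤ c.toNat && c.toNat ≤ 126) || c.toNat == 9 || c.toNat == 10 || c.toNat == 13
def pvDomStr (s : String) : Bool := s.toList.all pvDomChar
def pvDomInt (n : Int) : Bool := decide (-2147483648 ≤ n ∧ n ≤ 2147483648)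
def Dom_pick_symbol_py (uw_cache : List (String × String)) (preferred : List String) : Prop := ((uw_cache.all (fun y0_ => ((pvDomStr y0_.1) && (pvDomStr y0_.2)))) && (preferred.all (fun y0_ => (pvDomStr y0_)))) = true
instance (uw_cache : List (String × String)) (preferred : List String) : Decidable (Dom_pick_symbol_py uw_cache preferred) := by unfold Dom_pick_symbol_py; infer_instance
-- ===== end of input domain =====

-- B inverts the traversal: a rank index of the preferred symbols plus one argmin pass
-- over the cache keys, instead of A's loop over preferred with an uppercased-key dict.

-- ===== PORT A =====
-- keys = {str(k).upper(): k for k in uw_cache.keys() if k}   (str(k) = k on string keys)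
def pickA_keys (ks : List String) : PySem.Dict String String :=
  ks.foldl (fun d k => if k ≠ "" then d.insert (PySem.Str.upper k) k else d) PySem.Dict.empty

-- for p in preferred: u = p.upper(); if u in keys: return str(keys[u])
def pickA_loop (keys : PySem.Dict String String) : List String → Option String
  | [] => none
  | p :: ps =>
    let u := PySem.Str.upper p
    if keys.contains u then some (keys.getD u "") else pickA_loop keys ps

def pick_symbol_py (uw_cache : List (String × String)) (preferred : List String) : String :=
  let cacheKeys := PySem.Set.ofList (uw_cache.map (·.1))  -- uw_cache.keys(): distinct, insertion order
  match pickA_loop (pickA_keys cacheKeys) preferred with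
  | some r => r
  | none =>
    match cacheKeys with
    | k :: _ => k               -- if uw_cache: return str(next(iter(uw_cache.keys())))
    | [] => preferred.headD ""  -- preferred[0]; raises IndexError when preferred = [] — excluded by Pre_

-- ===== PORT B =====
-- rank = {}; for i, p in enumerate(preferred): rank.setdefault(p.upper(), i)
def pickB_rank (preferred : List String) : PySem.Dict String Int :=
  (PySem.List.enumerate preferred 0).foldl
    (fun r ip => r.setdefault (PySem.Str.upper ip.2) ip.1) PySem.Dict.empty

-- the key-scan loop, parameterised over the rank lookup f (= rank.get)
def pickB_scanF (f : String → Option Int) (acc : Option (Int × String)) (ks : List String) :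
    Option (Int × String) :=
  ks.foldl (fun best k =>
    if k = "" then best                    -- if not k: continue
    else
      match f (PySem.Str.upper k), best with
      | some i, none => some (i, k)
      | some i, some b => if i < b.1 then some (i, k) else best
      | none, _ => best) acc

def pick_symbol_py_alt (uw_cache : List (String × String)) (preferred : List String) : String :=
  let ks := PySem.Set.ofList (uw_cache.map (·.1))
  match pickB_scanF (fun u => (pickB_rank preferred).get? u) none ks with
  | some b => b.2                -- if best_k is not None: return str(best_k)
  | none =>
    match ks with
    | k :: _ => k               -- if uw_cache: return str(next(iter(uw_cache.keys())))
    | [] => preferred.headD ""  -- preferred[0]; raises IndexError when preferred = [] — excluded by Pre_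

-- ===== PRECONDITION & SPEC =====
-- Pre_ excludes (i) the input with both arguments empty, where A raises IndexError on
-- preferred[0], and (ii) caches with two distinct truthy keys that uppercase identically,
-- where A's dict-overwrite (last-wins) tie order is accidental and B keeps the first best key.
def Pre_pick_symbol_py (uw_cache : List (String × String)) (preferred : List String) : Prop :=
  ¬ (uw_cache = [] ∧ preferred = []) ∧
  (((PySem.Set.ofList (uw_cache.map (·.1))).filter (fun k => k ≠ "")).Pairwise
      (fun a b => PySem.Str.upper a ≠ PySem.Str.upper b))
instance (uw_cache : List (String × String)) (preferred : List String) : Decidable (Pre_pick_symbol_py uw_cache preferred) := by unfold Pre_pick_symbol_py; infer_instance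

def pvWitness_pick_symbol_py : (List (String × String)) × List String := ([("aapl", "x")], ["AAPL"])

def Spec_pick_symbol_py (uw_cache : List (String × String)) (preferred : List String) (out : String) : Prop := out = pick_symbol_py_alt uw_cache preferred
instance (uw_cache : List (String × String)) (preferred : List String) (out : String) : Decidable (Spec_pick_symbol_py uw_cache preferred out) := by unfold Spec_pick_symbol_py; infer_instance

-- ===== CLAIM (what is proved, stated in full; the proofs are below) =====
def Claim_equal_pick_symbol_py : Prop := ∀ (uw_cache : List (String × String)) (preferred : List String), Dom_pick_symbol_py uw_cache preferred → Pre_pick_symbol_py uw_cache preferred → Spec_pick_symbol_py uw_cache preferred (pick_symbol_py uw_cache preferred)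

-- ===== LEMMAS AND PROOFS =====

-- uniqueness of uppercased truthy keys, as used by the induction
def pvUK (ks : List String) : Prop :=
  ∀ a ∈ ks, ∀ b ∈ ks, a ≠ "" → b ≠ "" → PySem.Str.upper a = PySem.Str.upper b → a = b

-- last truthy key whose upper is u (A's dict-comprehension overwrite semantics)
def pvLastMatch (u : String) (ks : List String) : Option String :=
  ks.foldl (fun acc k => if k ≠ "" ∧ PySem.Str.upper k = u then some k else acc) none

-- first truthy key whose upper is u
def pvFind1 (u : String) (ks : List String) : Option String :=
  ks.find? (fun k => decide (k ≠ "") && (PySem.Str.upper k == u))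

-- A's loop, with the dict lookup replaced by pvLastMatch
def pvLoopLM (ks : List String) : List String → Option String
  | [] => none
  | p :: ps =>
    match pvLastMatch (PySem.Str.upper p) ks with
    | some k => some k
    | none => pvLoopLM ks ps

-- the same loop with first-match
def pvLoopF (ks : List String) : List String → Option String
  | [] => none
  | p :: ps =>
    match pvFind1 (PySem.Str.upper p) ks with
    | some k => some k
    | none => pvLoopF ks ps

-- rank of u in preferred: least index whose upper is u
def pvRankR : List String → String → Option Int
  | [], _ => none
  | p :: ps, u => if PySem.Str.upper p = u then some 0 else (pvRankR ps u).map (· + 1)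

theorem pv_get?_eq_lastMatch_aux (ks : List String) (u : String) :
    ∀ (d : PySem.Dict String String),
      (ks.foldl (fun d k => if k ≠ "" then d.insert (PySem.Str.upper k) k else d) d).get? u
        = ks.foldl (fun acc k => if k ≠ "" ∧ PySem.Str.upper k = u then some k else acc) (d.get? u) := by
  induction ks with
  | nil => intro d; rfl
  | cons k ks ih =>
    intro d
    simp only [List.foldl_cons]
    rw [ih]
    congr 1
    by_cases hk : k = ""
    · simp [hk]
    · rw [if_pos hk, PySem.Dict.get?_insert]
      by_cases hu : PySem.Str.upper k = u
      · simp [hk, hu]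
      · simp only [hk, hu, ne_eq, not_false_iff, true_and, if_neg]
        rw [if_neg]
        intro h; exact hu h.symm

theorem pvA_keys_get? (ks : List String) (u : String) :
    (pickA_keys ks).get? u = pvLastMatch u ks := by
  unfold pickA_keys pvLastMatch
  rw [pv_get?_eq_lastMatch_aux]
  rfl

theorem pvA_loop_eq_loopLM (ks : List String) (preferred : List String) :
    pickA_loop (pickA_keys ks) preferred = pvLoopLM ks preferred := by
  induction preferred with
  | nil => rfl
  | cons p ps ih =>
    unfold pickA_loop pvLoopLM
    simp only [PySem.Dict.contains_eq_isSome_get?, pvA_keys_get?]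
    cases hf : pvLastMatch (PySem.Str.upper p) ks with
    | none => simpa [hf] using ih
    | some k =>
      simp only [Option.isSome_some, if_pos]
      congr 1
      unfold PySem.Dict.getD
      rw [pvA_keys_get?, hf]
      rfl

-- a last-wins fold whose every tail match equals k stays at some k
theorem pvLastMatch_stay (u k : String) (ks : List String)
    (h : ∀ k' ∈ ks, (k' ≠ "" ∧ PySem.Str.upper k' = u) → k' = k) :
    ks.foldl (fun acc k' => if k' ≠ "" ∧ PySem.Str.upper k' = u then some k' else acc) (some k)
      = some k := by
  induction ks with
  | nil => rfl
  | cons x ks ih =>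
    simp only [List.foldl_cons]
    by_cases hx : x ≠ "" ∧ PySem.Str.upper x = u
    · rw [if_pos hx, h x List.mem_cons_self hx]
      exact ih (fun k' hk' => h k' (List.mem_cons_of_mem _ hk'))
    · rw [if_neg hx]
      exact ih (fun k' hk' => h k' (List.mem_cons_of_mem _ hk'))

theorem pvLastMatch_eq_find1 (u : String) (ks : List String) (huk : pvUK ks) :
    pvLastMatch u ks = pvFind1 u ks := by
  induction ks with
  | nil => rfl
  | cons k ks ih =>
    have huk' : pvUK ks := fun a ha b hb => huk a (List.mem_cons_of_mem _ ha) b (List.mem_cons_of_mem _ hb)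
    by_cases hk : k ≠ "" ∧ PySem.Str.upper k = u
    · unfold pvLastMatch pvFind1
      simp only [List.foldl_cons, List.find?_cons, if_pos hk]
      have hpred : (decide (k ≠ "") && (PySem.Str.upper k == u)) = true := by
        simp [hk.1, hk.2]
      rw [hpred]
      exact pvLastMatch_stay u k ks (fun k' hk' h' => by
        have := huk k' (List.mem_cons_of_mem _ hk') k List.mem_cons_self h'.1 hk.1
          (by rw [h'.2, hk.2])
        exact this)
    · unfold pvLastMatch pvFind1
      simp only [List.foldl_cons, List.find?_cons, if_neg hk]
      have hpred : (decide (k ≠ "") && (PySem.Str.upper k == u)) = false := by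
        by_cases h1 : k = ""
        · simp [h1]
        · by_cases h2 : PySem.Str.upper k = u
          · exact absurd ⟨h1, h2⟩ hk
          · simp [h1, h2]
      rw [hpred]
      exact ih huk'

theorem pvLoopLM_eq_loopF (ks : List String) (huk : pvUK ks) (ps : List String) :
    pvLoopLM ks ps = pvLoopF ks ps := by
  induction ps with
  | nil => rfl
  | cons p ps ih =>
    unfold pvLoopLM pvLoopF
    rw [pvLastMatch_eq_find1 _ _ huk, ih]

-- rank dict characterisation
theorem pvRank_get?_aux (u : String) (ps : List String) :
    ∀ (d : PySem.Dict String Int) (s : Int),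
      ((PySem.List.enumerate ps s).foldl
        (fun r ip => r.setdefault (PySem.Str.upper ip.2) ip.1) d).get? u
      = match d.get? u with
        | some v => some v
        | none => (pvRankR ps u).map (· + s) := by
  induction ps with
  | nil =>
    intro d s
    simp only [PySem.List.enumerate_nil, List.foldl_nil, pvRankR, Option.map_none]
    cases d.get? u <;> rfl
  | cons p ps ih =>
    intro d s
    rw [PySem.List.enumerate_cons, List.foldl_cons, ih]
    by_cases hu : PySem.Str.upper p = u
    · subst hu
      rw [PySem.Dict.get?_setdefault_self]
      cases hd : d.get? (PySem.Str.upper p) with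
      | some v => simp
      | none => simp [pvRankR]
    · rw [PySem.Dict.get?_setdefault_of_ne _ _ (fun h => hu h.symm)]
      cases hd : d.get? u with
      | some v => rfl
      | none =>
        simp only [pvRankR, if_neg hu, Option.map_map]
        cases pvRankR ps u with
        | none => rfl
        | some j => simp; ring

theorem pvRank_get? (preferred : List String) (u : String) :
    (pickB_rank preferred).get? u = pvRankR preferred u := by
  unfold pickB_rank
  rw [pvRank_get?_aux]
  cases h : pvRankR preferred u <;> simp [PySem.Dict.empty, PySem.Dict.get?]

theorem pvRankR_nonneg (ps : List String) (u : String) (i : Int)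
    (h : pvRankR ps u = some i) : 0 ≤ i := by
  induction ps generalizing i with
  | nil => simp [pvRankR] at h
  | cons p ps ih =>
    unfold pvRankR at h
    by_cases hu : PySem.Str.upper p = u
    · rw [if_pos hu] at h
      simp at h; omega
    · rw [if_neg hu] at h
      cases hr : pvRankR ps u with
      | none => rw [hr] at h; simp at h
      | some j => rw [hr] at h; simp at h; have := ih j hr; omega

-- scan congruence in the rank lookup
theorem pvScanF_congr (f g : String → Option Int) (ks : List String)
    (h : ∀ k ∈ ks, f (PySem.Str.upper k) = g (PySem.Str.upper k)) :
    ∀ acc, pickB_scanF f acc ks = pickB_scanF g acc ks := by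
  induction ks with
  | nil => intro acc; rfl
  | cons k ks ih =>
    intro acc
    unfold pickB_scanF
    simp only [List.foldl_cons]
    rw [h k List.mem_cons_self]
    exact ih (fun k' hk' => h k' (List.mem_cons_of_mem _ hk')) _

-- all lookups none: scan keeps its accumulator
theorem pvScanF_none (f : String → Option Int) (hf : ∀ u, f u = none)
    (ks : List String) : ∀ acc, pickB_scanF f acc ks = acc := by
  induction ks with
  | nil => intro acc; rfl
  | cons k ks ih =>
    intro acc
    rw [show pickB_scanF f acc (k :: ks) = pickB_scanF f
        (if k = "" then acc else
          match f (PySem.Str.upper k), acc with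
          | some i, none => some (i, k)
          | some i, some b => if i < b.1 then some (i, k) else acc
          | none, _ => acc) ks from rfl]
    rw [hf (PySem.Str.upper k)]
    by_cases hk : k = ""
    · rw [if_pos hk]; exact ih acc
    · rw [if_neg hk]; exact ih acc

-- once the best rank is 0, nothing replaces it
theorem pvScanF_keep0 (f : String → Option Int) (k0 : String) (ks : List String)
    (hnn : ∀ u i, f u = some i → 0 ≤ i) :
    pickB_scanF f (some (0, k0)) ks = some (0, k0) := by
  induction ks with
  | nil => rfl
  | cons k ks ih =>
    unfold pickB_scanF
    simp only [List.foldl_cons]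
    by_cases hk : k = ""
    · rw [if_pos hk]; exact ih
    · rw [if_neg hk]
      cases hfk : f (PySem.Str.upper k) with
      | none => exact ih
      | some i =>
        have : ¬ (i < 0) := by have := hnn _ _ hfk; omega
        simp only [this, if_neg, not_false_iff]
        exact ih

-- the unique key of rank 0 wins the argmin scan
theorem pvScanF_zero_wins (f : String → Option Int) (k0 : String) (ks : List String)
    (hnn : ∀ u i, f u = some i → 0 ≤ i)
    (hk0 : k0 ≠ "") (hf0 : f (PySem.Str.upper k0) = some 0)
    (huniq : ∀ k ∈ ks, k ≠ "" → f (PySem.Str.upper k) = some 0 → k = k0)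
    (hmem : k0 ∈ ks) :
    ∀ acc, (acc = none ∨ ∃ i k', acc = some (i, k') ∧ 0 < i) →
      pickB_scanF f acc ks = some (0, k0) := by
  induction ks with
  | nil => intro acc h; exact absurd hmem (by simp)
  | cons k ks ih =>
    intro acc hacc
    unfold pickB_scanF
    simp only [List.foldl_cons]
    by_cases hkk0 : k = k0
    · subst hkk0
      rw [if_neg (by simpa using hk0), hf0]
      rcases hacc with h | ⟨i, k', h, hi⟩
      · subst h
        exact pvScanF_keep0 f k ks hnn
      · subst h
        simp only [hi, if_pos]
        exact pvScanF_keep0 f k ks hnn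
    · have hmem' : k0 ∈ ks := by
        rcases List.mem_cons.mp hmem with h | h
        · exact absurd h.symm hkk0
        · exact h
      have huniq' : ∀ k ∈ ks, k ≠ "" → f (PySem.Str.upper k) = some 0 → k = k0 :=
        fun k hk => huniq k (List.mem_cons_of_mem _ hk)
      by_cases hk : k = ""
      · rw [if_pos hk]; exact ih huniq' hmem' acc hacc
      · rw [if_neg hk]
        cases hfk : f (PySem.Str.upper k) with
        | none => exact ih huniq' hmem' acc hacc
        | some i =>
          have hipos : 0 < i := by
            have h0 := hnn _ _ hfk
            rcases lt_or_eq_of_le h0 with h | h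
            · exact h
            · exfalso; exact hkk0 (huniq k List.mem_cons_self hk (by rw [hfk, ← h]))
          rcases hacc with h | ⟨j, k', h, hj⟩
          · subst h
            exact ih huniq' hmem' _ (Or.inr ⟨i, k, rfl, hipos⟩)
          · subst h
            by_cases hij : i < j
            · simp only [hij, if_pos]
              exact ih huniq' hmem' _ (Or.inr ⟨i, k, rfl, hipos⟩)
            · simp only [hij, if_neg, not_false_iff]
              exact ih huniq' hmem' _ (Or.inr ⟨j, k', rfl, hj⟩)

def pvShiftO : Option (Int × String) → Option (Int × String) :=
  Option.map (fun b => (b.1 + 1, b.2))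

-- scanning with every rank shifted by one shifts the result by one
theorem pvScanF_shift (f g : String → Option Int) (ks : List String)
    (hfg : ∀ k ∈ ks, k ≠ "" → f (PySem.Str.upper k) = (g (PySem.Str.upper k)).map (· + 1)) :
    ∀ acc, pickB_scanF f (pvShiftO acc) ks = pvShiftO (pickB_scanF g acc ks) := by
  induction ks with
  | nil => intro acc; rfl
  | cons k ks ih =>
    intro acc
    unfold pickB_scanF
    simp only [List.foldl_cons]
    have ih' := fun acc => ih (fun k' hk' => hfg k' (List.mem_cons_of_mem _ hk')) acc
    by_cases hk : k = ""
    · rw [if_pos hk, if_pos hk]; exact ih' acc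
    · rw [if_neg hk, if_neg hk, hfg k List.mem_cons_self hk]
      cases hg : g (PySem.Str.upper k) with
      | none => exact ih' acc
      | some j =>
        cases acc with
        | none =>
          have : pvShiftO (some (j, k)) = some (j + 1, k) := rfl
          simp only [Option.map_some, pvShiftO]
          exact ih' (some (j, k))
        | some b =>
          simp only [Option.map_some, pvShiftO]
          by_cases hij : j < b.1
          · have h1 : j + 1 < b.1 + 1 := by omega
            simp only [hij, h1, if_pos]
            exact ih' (some (j, k))
          · have h1 : ¬ (j + 1 < b.1 + 1) := by omega
            simp only [hij, h1, if_neg, not_false_iff]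
            exact ih' (some b)

-- main: A's preferred-loop equals B's argmin key-scan, under unique truthy uppers
theorem pvMain (ks : List String) (huk : pvUK ks) (ps : List String) :
    pvLoopF ks ps = (pickB_scanF (pvRankR ps) none ks).map (·.2) := by
  induction ps with
  | nil =>
    rw [pvScanF_none (pvRankR []) (fun u => rfl) ks none]
    rfl
  | cons p ps ih =>
    unfold pvLoopF
    cases hf : pvFind1 (PySem.Str.upper p) ks with
    | some k0 =>
      have hspec := List.find?_some hf
      have hmem := List.mem_of_find?_eq_some hf
      have hk0ne : k0 ≠ "" := by
        simp only [Bool.and_eq_true, decide_eq_true_eq, beq_iff_eq] at hspec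
        exact hspec.1
      have hk0u : PySem.Str.upper k0 = PySem.Str.upper p := by
        simp only [Bool.and_eq_true, decide_eq_true_eq, beq_iff_eq] at hspec
        exact hspec.2
      have hf0 : pvRankR (p :: ps) (PySem.Str.upper k0) = some 0 := by
        unfold pvRankR
        rw [if_pos hk0u.symm]
      have hnn : ∀ u i, pvRankR (p :: ps) u = some i → 0 ≤ i :=
        fun u i h => pvRankR_nonneg _ u i h
      have huniq : ∀ k ∈ ks, k ≠ "" → pvRankR (p :: ps) (PySem.Str.upper k) = some 0 → k = k0 := by
        intro k hk hkne h0
        have hku : PySem.Str.upper k = PySem.Str.upper p := by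
          unfold pvRankR at h0
          by_cases hpu : PySem.Str.upper p = PySem.Str.upper k
          · exact hpu.symm
          · rw [if_neg hpu] at h0
            cases hr : pvRankR ps (PySem.Str.upper k) with
            | none => rw [hr] at h0; simp at h0
            | some j =>
              rw [hr] at h0; simp at h0
              have := pvRankR_nonneg ps _ j hr; omega
        exact huk k hk k0 hmem hkne hk0ne (by rw [hku, hk0u])
      rw [pvScanF_zero_wins (pvRankR (p :: ps)) k0 ks hnn hk0ne hf0 huniq hmem none (Or.inl rfl)]
      rfl
    | none =>
      have hno : ∀ k ∈ ks, ¬ ((decide (k ≠ "") && (PySem.Str.upper k == PySem.Str.upper p)) = true) := by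
        intro k hk
        exact (List.find?_eq_none.mp hf) k hk
      have hshift : ∀ k ∈ ks, k ≠ "" →
          pvRankR (p :: ps) (PySem.Str.upper k) = (pvRankR ps (PySem.Str.upper k)).map (· + 1) := by
        intro k hk hkne
        have hne : PySem.Str.upper p ≠ PySem.Str.upper k := by
          intro h; exact hno k hk (by simp [hkne, h.symm])
        show (if PySem.Str.upper p = PySem.Str.upper k then some 0
              else (pvRankR ps (PySem.Str.upper k)).map (· + 1))
            = (pvRankR ps (PySem.Str.upper k)).map (· + 1)
        rw [if_neg hne]
      have := pvScanF_shift (pvRankR (p :: ps)) (pvRankR ps) ks hshift none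
      have hsh : pvShiftO (none : Option (Int × String)) = none := rfl
      rw [hsh] at this
      rw [this, ih]
      unfold pvShiftO
      cases pickB_scanF (pvRankR ps) none ks <;> rfl

-- Pre_'s pairwise condition implies pvUK
theorem pvPre_UK (uw_cache : List (String × String)) (preferred : List String)
    (hpre : Pre_pick_symbol_py uw_cache preferred) :
    pvUK (PySem.Set.ofList (uw_cache.map (·.1))) := by
  intro a ha b hb hane hbne hu
  by_contra hne
  have hmema : a ∈ (PySem.Set.ofList (uw_cache.map (·.1))).filter (fun k => k ≠ "") := by
    simp [List.mem_filter, ha, hane]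
  have hmemb : b ∈ (PySem.Set.ofList (uw_cache.map (·.1))).filter (fun k => k ≠ "") := by
    simp [List.mem_filter, hb, hbne]
  have hsymm : Symmetric (fun a b : String => PySem.Str.upper a ≠ PySem.Str.upper b) :=
    fun x y h => fun e => h e.symm
  exact (hpre.2.forall hsymm hmema hmemb hne) hu

-- ===== VERDICT (by name: the statement is the Claim_ definition above) =====
theorem pick_symbol_py_spec : Claim_equal_pick_symbol_py := by
  intro uw_cache preferred _ hpre
  unfold Spec_pick_symbol_py pick_symbol_py pick_symbol_py_alt
  have huk := pvPre_UK uw_cache preferred hpre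
  have h1 := pvA_loop_eq_loopLM (PySem.Set.ofList (uw_cache.map (·.1))) preferred
  have h2 := pvLoopLM_eq_loopF (PySem.Set.ofList (uw_cache.map (·.1))) huk preferred
  have h3 := pvMain (PySem.Set.ofList (uw_cache.map (·.1))) huk preferred
  have h4 := pvScanF_congr (fun u => (pickB_rank preferred).get? u) (pvRankR preferred)
    (PySem.Set.ofList (uw_cache.map (·.1))) (fun k _ => pvRank_get? preferred _) none
  simp only [h1, h2, h3, h4]
  cases pickB_scanF (pvRankR preferred) none (PySem.Set.ofList (uw_cache.map (·.1))) <;> rfl
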